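-- pv_equiv track=rewrite | github.com/wangqin1723-max/pypto | tests/st/fuzz/src/orchestrator_generator.py | _collect_input_shapes
-- ===== SOURCE A (Python) =====
-- from typing import Any
--
-- def _collect_input_shapes(kernels: list[dict[str, Any]]) -> dict[str, tuple[int, int]]:
--     """Collect unified input shapes across all kernels.
--
--     When multiple kernels use the same input name with different shapes,
--     the larger shape (by total element count) is kept.
--
--     Args:
--         kernels: List of kernel info dicts
--
--     Returns:
--         Mapping from input names to their unified shapes
--     """
--     input_shapes_map: dict[str, tuple[int, int]] = {}
--     for kernel in kernels:
--         for inp_name, inp_shape in kernel["inputs"]: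
--             if inp_name not in input_shapes_map:
--                 input_shapes_map[inp_name] = inp_shape
--             elif inp_shape != input_shapes_map[inp_name]:
--                 existing_size = input_shapes_map[inp_name][0] * input_shapes_map[inp_name][1]
--                 new_size = inp_shape[0] * inp_shape[1]
--                 if new_size > existing_size:
--                     input_shapes_map[inp_name] = inp_shape
--     return input_shapes_map
-- ===== SOURCE B (Python) =====
-- def _collect_input_shapes(kernels):
--     """Two-pass rewrite: group every shape by input name, then reduce each
--     group with max (first maximal element wins, matching the original's
--     first-seen strictly-greater replacement rule)."""
--     groups: dict = {}
--     for kernel in kernels: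
--         for inp_name, inp_shape in kernel["inputs"]:
--             groups.setdefault(inp_name, []).append(inp_shape)
--     return {name: max(shapes, key=lambda s: s[0] * s[1])
--             for name, shapes in groups.items()}
-- ===== Notes on version B (the rewrite author's own statement) =====
-- stated objective: alternative
-- what changed: A's single interleaved loop with in-place compare-and-replace is split into two passes: first group every shape under its input name in encounter order, then reduce each group with max(key=element count), whose first-wins tie rule reproduces A's strictly-greater replacement.
import Mathlib
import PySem

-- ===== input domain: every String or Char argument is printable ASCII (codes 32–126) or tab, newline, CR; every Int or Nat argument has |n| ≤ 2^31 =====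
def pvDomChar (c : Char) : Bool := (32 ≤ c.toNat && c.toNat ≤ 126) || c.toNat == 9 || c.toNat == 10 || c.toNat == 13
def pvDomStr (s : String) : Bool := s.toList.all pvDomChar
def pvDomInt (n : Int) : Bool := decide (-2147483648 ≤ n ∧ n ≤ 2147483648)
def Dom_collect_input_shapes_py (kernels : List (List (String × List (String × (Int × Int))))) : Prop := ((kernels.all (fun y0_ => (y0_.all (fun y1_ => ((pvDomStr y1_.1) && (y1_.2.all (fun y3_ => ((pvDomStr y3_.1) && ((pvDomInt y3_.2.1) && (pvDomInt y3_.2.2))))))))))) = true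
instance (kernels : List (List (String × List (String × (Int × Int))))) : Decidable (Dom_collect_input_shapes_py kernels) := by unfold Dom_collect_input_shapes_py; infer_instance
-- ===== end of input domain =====

-- B replaces A's single loop with interleaved compare-and-replace by a two-pass
-- decomposition: group all shapes by input name, then reduce each group with a
-- first-wins max by element count (objective: alternative, same cost).

-- ===== PORT A =====
-- A's loop body: new name → insert; different shape with strictly larger size → replace.
def pvStepA (m : PySem.Dict String (Int × Int)) (p : String × Int × Int) : PySem.Dict String (Int × Int) :=
  match m.get? p.1 with
  | none => m.insert p.1 p.2
  | some ex =>
    if p.2 ≠ ex then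
      if p.2.1 * p.2.2 > ex.1 * ex.2 then m.insert p.1 p.2 else m
    else m

-- kernel["inputs"]: first-match lookup in the kernel association list; the
-- `.getD []` arm is unreachable under Pre_ (Python raises KeyError there).
def pvInputs (kernel : List (String × List (String × (Int × Int)))) : List (String × Int × Int) :=
  ((PySem.Dict.mk kernel).get? "inputs").getD []

def collect_input_shapes_py (kernels : List (List (String × List (String × (Int × Int))))) : List (String × Int × Int) :=
  (kernels.foldl (fun m kernel => (pvInputs kernel).foldl pvStepA m) PySem.Dict.empty).items

-- ===== PORT B =====
-- Source B's grouping step: groups.setdefault(name, []).append(shape)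
def pvStepG (g : PySem.Dict String (List (Int × Int))) (p : String × Int × Int) :
    PySem.Dict String (List (Int × Int)) :=
  g.modify p.1 [] (· ++ [p.2])

-- Source B's reduction: max(shapes, key=lambda s: s[0]*s[1]); the (0, 0) default is
-- a totality guard only (every group built by pvStepG is nonempty).
def pvPick (ss : List (Int × Int)) : Int × Int :=
  PySem.List.maxD ss (fun s => s.1 * s.2) (0, 0)

def collect_input_shapes_py_alt (kernels : List (List (String × List (String × (Int × Int))))) : List (String × Int × Int) :=
  let groups := kernels.foldl (fun g kernel => (pvInputs kernel).foldl pvStepG g) PySem.Dict.empty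
  groups.items.map (fun q => (q.1, pvPick q.2))

-- ===== PRECONDITION & SPEC =====
-- Pre_ excludes exactly the kernels without an "inputs" key, on which Python A raises KeyError.
def Pre_collect_input_shapes_py (kernels : List (List (String × List (String × (Int × Int))))) : Prop :=
  ∀ kernel ∈ kernels, (PySem.Dict.mk kernel).contains "inputs" = true
instance (kernels : List (List (String × List (String × (Int × Int))))) : Decidable (Pre_collect_input_shapes_py kernels) := by unfold Pre_collect_input_shapes_py; infer_instance

def pvWitness_collect_input_shapes_py : (List (List (String × List (String × (Int × Int))))) :=
  [[("inputs", [("x", (2, 3)), ("y", (1, 1))])], [("inputs", [("x", (1, 2))])]]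

def Spec_collect_input_shapes_py (kernels : List (List (String × List (String × (Int × Int))))) (out : List (String × Int × Int)) : Prop := out = collect_input_shapes_py_alt kernels
instance (kernels : List (List (String × List (String × (Int × Int))))) (out : List (String × Int × Int)) : Decidable (Spec_collect_input_shapes_py kernels out) := by unfold Spec_collect_input_shapes_py; infer_instance

-- ===== CLAIM (what is proved, stated in full; the proofs are below) =====
def Claim_equal_collect_input_shapes_py : Prop := ∀ (kernels : List (List (String × List (String × (Int × Int))))), Dom_collect_input_shapes_py kernels → Pre_collect_input_shapes_py kernels → Spec_collect_input_shapes_py kernels (collect_input_shapes_py kernels)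

-- ===== LEMMAS AND PROOFS =====

-- the value-side projection relating B's grouping dict to A's running dict
def pvF (q : String × List (Int × Int)) : String × Int × Int := (q.1, pvPick q.2)

theorem pvGet?_map_pick (l : List (String × List (Int × Int))) (k : String) :
    (PySem.Dict.mk (l.map pvF)).get? k = ((PySem.Dict.mk l).get? k).map pvPick := by
  simp only [PySem.Dict.get?, List.find?_map]
  have h : ((fun p : String × Int × Int => p.1 == k) ∘ pvF) = (fun q : String × List (Int × Int) => q.1 == k) := by
    funext q; rfl
  rw [h]
  cases List.find? (fun q : String × List (Int × Int) => q.1 == k) l <;> rfl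

theorem pvPick_snoc (ss : List (Int × Int)) (s : Int × Int) (hss : ss ≠ []) :
    pvPick (ss ++ [s]) =
      if (pvPick ss).1 * (pvPick ss).2 < s.1 * s.2 then s else pvPick ss := by
  obtain ⟨m, hm⟩ : ∃ m, PySem.List.max? ss (fun s => s.1 * s.2) = some m := by
    cases h : PySem.List.max? ss (fun s => s.1 * s.2) with
    | none => exact absurd ((PySem.List.max?_eq_none_iff _ _).1 h) hss
    | some m => exact ⟨m, rfl⟩
  simp only [pvPick, PySem.List.maxD, PySem.List.max?] at hm ⊢
  rw [List.foldl_append, hm]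
  by_cases hc : m.1 * m.2 < s.1 * s.2 <;> simp [List.foldl, hc]

theorem pvStepG_nodup (g : PySem.Dict String (List (Int × Int))) (p : String × Int × Int)
    (hnd : g.keys.Nodup) : (pvStepG g p).keys.Nodup := by
  have h := PySem.Dict.nodup_keys_foldl_modify_key [p] (fun q : String × Int × Int => q.1)
    ([] : List (Int × Int)) (fun _ q => (· ++ [q.2])) g hnd
  simpa [pvStepG] using h

theorem pvStepG_ne (g : PySem.Dict String (List (Int × Int))) (p : String × Int × Int)
    (hne : ∀ q ∈ g.items, q.2 ≠ []) : ∀ q ∈ (pvStepG g p).items, q.2 ≠ [] := by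
  intro q hq
  unfold pvStepG PySem.Dict.modify at hq
  rcases (PySem.Dict.mem_items_insert g p.1 (g.getD p.1 [] ++ [p.2]) q).1 hq with h | h
  · subst h; simp
  · exact hne q h.1

theorem pvStep_comm (g : PySem.Dict String (List (Int × Int))) (p : String × Int × Int)
    (hnd : g.keys.Nodup) (hne : ∀ q ∈ g.items, q.2 ≠ []) :
    pvStepA (PySem.Dict.mk (g.items.map pvF)) p = PySem.Dict.mk ((pvStepG g p).items.map pvF) := by
  obtain ⟨n, s⟩ := p
  have hget := pvGet?_map_pick g.items n
  unfold pvStepA pvStepG PySem.Dict.modify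
  cases h : g.get? n with
  | none =>
    -- fresh name: both sides append
    have hgc : g.contains n = false := by rw [PySem.Dict.contains_eq_isSome_get?, h]; rfl
    have hac : (PySem.Dict.mk (g.items.map pvF)).contains n = false := by
      rw [PySem.Dict.contains_eq_isSome_get?, hget]; simp [h]
    have hgd : g.getD n [] = [] := by simp [PySem.Dict.getD, h]
    rw [hget, h]
    simp only [Option.map_none]
    unfold PySem.Dict.insert
    rw [hgd]
    simp [hac, hgc, pvF]
    rfl
  | some ss =>
    -- existing name
    have hssne : ss ≠ [] := by
      have hf := h
      simp only [PySem.Dict.get?] at hf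
      cases hq : List.find? (fun q : String × List (Int × Int) => q.1 == n) g.items with
      | none => rw [hq] at hf; simp at hf
      | some q =>
        rw [hq] at hf
        simp only [Option.map_some, Option.some.injEq] at hf
        have := hne q (List.mem_of_find?_eq_some hq)
        rw [hf] at this; exact this
    have hgc : g.contains n = true := by rw [PySem.Dict.contains_eq_isSome_get?, h]; rfl
    have hac : (PySem.Dict.mk (g.items.map pvF)).contains n = true := by
      rw [PySem.Dict.contains_eq_isSome_get?, hget]; simp [h]
    have hgd : g.getD n [] = ss := by simp [PySem.Dict.getD, h]
    have hpick := pvPick_snoc ss s hssne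
    rw [hget, h]
    simp only [Option.map_some]
    have hA : (if s ≠ pvPick ss then
          if s.1 * s.2 > (pvPick ss).1 * (pvPick ss).2 then (PySem.Dict.mk (g.items.map pvF)).insert n s
          else PySem.Dict.mk (g.items.map pvF)
        else PySem.Dict.mk (g.items.map pvF))
        = if (pvPick ss).1 * (pvPick ss).2 < s.1 * s.2 then (PySem.Dict.mk (g.items.map pvF)).insert n s
          else PySem.Dict.mk (g.items.map pvF) := by
      by_cases hse : s = pvPick ss
      · subst hse; simp
      · simp [hse, gt_iff_lt]
    rw [hA]
    unfold PySem.Dict.insert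
    rw [hgd]
    simp only [hac, hgc, if_true, List.map_map]
    by_cases hlt : (pvPick ss).1 * (pvPick ss).2 < s.1 * s.2
    · simp only [hlt, if_true]
      congr 1
      apply List.map_congr_left
      intro q _
      by_cases hq1 : q.1 = n
      · simp [pvF, hq1, hpick, hlt]
      · simp [pvF, hq1]
    · simp only [hlt, if_false]
      symm
      congr 1
      apply List.map_congr_left
      intro q hq
      by_cases hq1 : q.1 = n
      · have : g.get? q.1 = some q.2 := PySem.Dict.get?_of_mem_items g hq hnd
        rw [hq1, h] at this
        have hq2 : q.2 = ss := by injection this with h'; exact h'.symm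
        have hqeq : q = (n, ss) := by
          obtain ⟨q1, q2⟩ := q; simp at hq1 hq2; simp [hq1, hq2]
        simp [pvF, hpick, hlt, hqeq]
      · simp [pvF, hq1]

theorem pvFold_comm (ps : List (String × Int × Int)) (g : PySem.Dict String (List (Int × Int)))
    (hnd : g.keys.Nodup) (hne : ∀ q ∈ g.items, q.2 ≠ []) :
    ps.foldl pvStepA (PySem.Dict.mk (g.items.map pvF)) =
      PySem.Dict.mk ((ps.foldl pvStepG g).items.map pvF) := by
  induction ps generalizing g with
  | nil => rfl
  | cons p t ih =>
    simp only [List.foldl_cons]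
    rw [pvStep_comm g p hnd hne]
    exact ih (pvStepG g p) (pvStepG_nodup g p hnd) (pvStepG_ne g p hne)

-- ===== VERDICT (by name: the statement is the Claim_ definition above) =====
theorem collect_input_shapes_py_spec : Claim_equal_collect_input_shapes_py := by
  intro kernels _ _
  unfold Spec_collect_input_shapes_py collect_input_shapes_py collect_input_shapes_py_alt
  have hA : kernels.foldl (fun m kernel => (pvInputs kernel).foldl pvStepA m) PySem.Dict.empty
      = ((kernels.map pvInputs).flatten).foldl pvStepA PySem.Dict.empty := by
    rw [List.foldl_flatten, List.foldl_map]
  have hB : kernels.foldl (fun g kernel => (pvInputs kernel).foldl pvStepG g) PySem.Dict.empty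
      = ((kernels.map pvInputs).flatten).foldl pvStepG PySem.Dict.empty := by
    rw [List.foldl_flatten, List.foldl_map]
  rw [hA, hB]
  have key := pvFold_comm ((kernels.map pvInputs).flatten) PySem.Dict.empty
    (by simp [PySem.Dict.empty, PySem.Dict.keys]) (by simp [PySem.Dict.empty])
  simp only [show PySem.Dict.mk (List.map pvF PySem.Dict.empty.items)
      = (PySem.Dict.empty : PySem.Dict String (Int × Int)) from rfl] at key
  rw [key]
  simp [pvF]
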